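-- pv_equiv track=rewrite | github.com/Nadolina-Kseniia/PRiTPO | LR2/Decoder2/test_Decoder.py | decrypt_blocks
-- ===== SOURCE A (Python) =====
-- def decrypt_blocks(input_data):
--     known_plain_text = "the quick brown fox jumps over the lazy dog"
--
--     def find_mapping(encrypted_line):
--         mapping = {}
--         reverse_mapping = {}
--         encrypted_words = encrypted_line.split()
--         known_words = known_plain_text.split()
--
--         if len(encrypted_words) != len(known_words):
--             return None
--
--         for enc_word, known_word in zip(encrypted_words, known_words):
--             if len(enc_word) != len(known_word):
--                 return None
--             for enc_char, known_char in zip(enc_word, known_word):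
--                 if enc_char in mapping:
--                     if mapping[enc_char] != known_char:
--                         return None
--                 else:
--                     mapping[enc_char] = known_char
--
--                 if known_char in reverse_mapping:
--                     if reverse_mapping[known_char] != enc_char:
--                         return None
--                 else:
--                      reverse_mapping[known_char] = enc_char
--         return mapping
--
--
--     def decrypt_line(line, mapping):
--         decrypted = []
--         for char in line:
--             decrypted.append(mapping.get(char, char)) # используем get для дефолтных символов
--         return ''.join(decrypted)
--
--     blocks = input_data.strip().split('\n\n')
--     results = []
--
--     for block in blocks:
--         lines = block.strip().split('\n')
--         block_id = lines[0] # Сохраняем идентификатор блока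
--         encrypted_lines = lines[1:]
--
--         if len(encrypted_lines) > 100\
--                 or any(len(line) > 80 for line in encrypted_lines) or\
--                 any(any(c not in "abcdefghijklmnopqrstuvwxyz " for c in line) for\
--                     line in encrypted_lines):
--             results.append(f"{block_id}\nNo solution")
--             continue
--
--
--         mapping = find_mapping(encrypted_lines[0])
--
--         if mapping:
--             decrypted_lines = [decrypt_line(line, mapping) for line in encrypted_lines]
--             results.append(f"{block_id}\n" + '\n'.join(decrypted_lines))
--         else:
--             results.append(f"{block_id}\nNo solution")
--
--
--     return '\n\n'.join(results)
-- ===== SOURCE B (Python) =====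
-- def decrypt_blocks(input_data):
--     known = "the quick brown fox jumps over the lazy dog"
--     known_words = known.split()
--     k = ''.join(known_words)
--
--     def solve(block):
--         lines = block.strip().split('\n')
--         head, body = lines[0], lines[1:]
--         if (len(body) > 100
--                 or any(len(line) > 80
--                        or any(c not in "abcdefghijklmnopqrstuvwxyz " for c in line)
--                        for line in body)):
--             return head + "\nNo solution"
--         enc_words = body[0].split()
--         if [len(w) for w in enc_words] != [len(w) for w in known_words]:
--             return head + "\nNo solution"
--         e = ''.join(enc_words)
--         # a consistent bijective letter substitution exists iff the two strings
--         # have the same first-occurrence pattern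
--         if [e.index(c) for c in e] != [k.index(c) for c in k]:
--             return head + "\nNo solution"
--         decoded = [''.join(k[e.index(c)] if c in e else c for c in line) for line in body]
--         return head + "\n" + '\n'.join(decoded)
--
--     return '\n\n'.join(solve(b) for b in input_data.strip().split('\n\n'))
-- ===== Notes on version B (the rewrite author's own statement) =====
-- stated objective: alternative
-- what changed: B drops both dictionaries: validity of the substitution is decided by comparing the first-occurrence index pattern of the joined encrypted words with that of the joined known plaintext (equal patterns iff a consistent bijective mapping exists), and decryption looks each character up positionally via k[e.index(c)] instead of a mapping dict.
import Mathlib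
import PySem

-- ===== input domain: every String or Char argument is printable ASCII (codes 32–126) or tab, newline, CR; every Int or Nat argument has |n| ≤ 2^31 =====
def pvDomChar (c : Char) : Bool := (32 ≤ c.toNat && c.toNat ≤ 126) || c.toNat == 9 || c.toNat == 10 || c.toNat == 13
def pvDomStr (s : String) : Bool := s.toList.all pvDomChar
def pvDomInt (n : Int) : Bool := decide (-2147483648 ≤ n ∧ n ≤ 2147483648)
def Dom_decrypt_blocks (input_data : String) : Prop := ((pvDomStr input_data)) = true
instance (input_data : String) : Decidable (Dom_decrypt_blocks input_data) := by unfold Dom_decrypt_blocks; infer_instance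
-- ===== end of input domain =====

-- B replaces A's dictionary-building find_mapping entirely: validity is decided by comparing the
-- first-occurrence index pattern of the joined encrypted words with that of the joined known
-- plaintext, and decryption looks characters up positionally (k[e.index(c)]) with no dict at all
-- (objective: alternative).

-- ===== PORT A =====
def pvKnownPlain : List Char := "the quick brown fox jumps over the lazy dog".toList
def pvAlphabet : List Char := "abcdefghijklmnopqrstuvwxyz ".toList
def pvNoSolution : List Char := "No solution".toList

-- A's inner char loop: state (mapping, reverse_mapping), early `return None` = none
def pvChLoopA : List (Char × Char) → PySem.Dict Char Char × PySem.Dict Char Char →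
    Option (PySem.Dict Char Char × PySem.Dict Char Char)
  | [], st => some st
  | (e, k) :: ps, (m, r) =>
    match m.get? e with
    | some k' =>
      if k' ≠ k then none
      else
        match r.get? k with
        | some e' => if e' ≠ e then none else pvChLoopA ps (m, r)
        | none => pvChLoopA ps (m, r.insert k e)
    | none =>
      match r.get? k with
      | some e' => if e' ≠ e then none else pvChLoopA ps (m.insert e k, r)
      | none => pvChLoopA ps (m.insert e k, r.insert k e)

-- A's outer word loop (per-word length check, then the char loop)
def pvWordLoopA : List (List Char × List Char) → PySem.Dict Char Char × PySem.Dict Char Char →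
    Option (PySem.Dict Char Char)
  | [], st => some st.1
  | (ew, kw) :: ws, st =>
    if ew.length ≠ kw.length then none
    else
      match pvChLoopA (ew.zip kw) st with
      | none => none
      | some st' => pvWordLoopA ws st'

def pvFindMappingA (line : List Char) : Option (PySem.Dict Char Char) :=
  let encrypted_words := PySem.Chars.split₀ line
  let known_words := PySem.Chars.split₀ pvKnownPlain
  if encrypted_words.length ≠ known_words.length then none
  else pvWordLoopA (encrypted_words.zip known_words) (PySem.Dict.empty, PySem.Dict.empty)

def pvDecryptLineA (line : List Char) (m : PySem.Dict Char Char) : List Char :=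
  PySem.Chars.join [] (line.map (fun c => [m.getD c c]))

-- one iteration of A's `for block in blocks` body (the result string appended to `results`)
def pvBlockA (block : List Char) : List Char :=
  let lines := PySem.Chars.splitOn (PySem.Chars.strip block) ['\n']
  let block_id := PySem.List.pyGetD lines 0 []
  let encrypted_lines := PySem.List.slice lines (some 1) none
  if decide (encrypted_lines.length > 100)
      || encrypted_lines.any (fun line => decide (line.length > 80))
      || encrypted_lines.any (fun line => line.any (fun c => !(pvAlphabet.contains c))) then
    block_id ++ '\n' :: pvNoSolution
  else
    match pvFindMappingA (PySem.List.pyGetD encrypted_lines 0 []) with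
    | some m =>
      if m.items.isEmpty then block_id ++ '\n' :: pvNoSolution   -- `if mapping:` falsy empty dict
      else block_id ++ '\n' ::
        PySem.Chars.join ['\n'] (encrypted_lines.map (fun line => pvDecryptLineA line m))
    | none => block_id ++ '\n' :: pvNoSolution

def decrypt_blocks (input_data : String) : String :=
  let blocks := PySem.Chars.splitOn (PySem.Chars.strip input_data.toList) ['\n', '\n']
  let results := blocks.foldl (fun results block => results ++ [pvBlockA block]) []
  String.ofList (PySem.Chars.join ['\n', '\n'] results)

-- ===== PORT B =====
-- k = ''.join(known_words)
def pvKB : List Char := PySem.Chars.join [] (PySem.Chars.split₀ pvKnownPlain)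

-- `k[e.index(c)] if c in e else c`; the index returned by e.index(c) is a valid position, so the
-- defaults in the match/pyGetD are never reached (they only totalise the transliteration)
def pvDecCharB (e k : List Char) (c : Char) : Char :=
  if e.contains c then
    match PySem.List.index? e c with
    | some i => PySem.List.pyGetD k (i : Int) c
    | none => c
  else c

def pvSolveBlockB (block : List Char) : List Char :=
  let lines := PySem.Chars.splitOn (PySem.Chars.strip block) ['\n']
  let head := PySem.List.pyGetD lines 0 []
  let body := PySem.List.slice lines (some 1) none
  if decide (body.length > 100)
      || body.any (fun line => decide (line.length > 80)
           || line.any (fun c => !(pvAlphabet.contains c))) then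
    head ++ '\n' :: pvNoSolution
  else
    let enc_words := PySem.Chars.split₀ (PySem.List.pyGetD body 0 [])
    if enc_words.map List.length ≠ (PySem.Chars.split₀ pvKnownPlain).map List.length then
      head ++ '\n' :: pvNoSolution
    else
      let e := PySem.Chars.join [] enc_words
      -- a consistent bijective substitution exists iff first-occurrence patterns coincide
      if e.map (fun c => PySem.List.index? e c) ≠ pvKB.map (fun c => PySem.List.index? pvKB c) then
        head ++ '\n' :: pvNoSolution
      else
        head ++ '\n' :: PySem.Chars.join ['\n']
          (body.map (fun line => PySem.Chars.join [] (line.map (fun c => [pvDecCharB e pvKB c]))))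

def decrypt_blocks_alt (input_data : String) : String :=
  String.ofList (PySem.Chars.join ['\n', '\n']
    ((PySem.Chars.splitOn (PySem.Chars.strip input_data.toList) ['\n', '\n']).map pvSolveBlockB))

-- ===== PRECONDITION & SPEC =====
-- Pre_ excludes exactly the inputs on which Python A raises IndexError: some block of the
-- (stripped) input has a single line, so `encrypted_lines` is empty and `encrypted_lines[0]` fails.
def Pre_decrypt_blocks (input_data : String) : Prop :=
  ∀ b ∈ PySem.Chars.splitOn (PySem.Chars.strip input_data.toList) ['\n', '\n'],
    2 ≤ (PySem.Chars.splitOn (PySem.Chars.strip b) ['\n']).length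
instance (input_data : String) : Decidable (Pre_decrypt_blocks input_data) := by
  unfold Pre_decrypt_blocks; infer_instance
def pvWitness_decrypt_blocks : String := "1\nabc"

def Spec_decrypt_blocks (input_data : String) (out : String) : Prop := out = decrypt_blocks_alt input_data
instance (input_data : String) (out : String) : Decidable (Spec_decrypt_blocks input_data out) := by
  unfold Spec_decrypt_blocks; infer_instance

-- ===== CLAIM (what is proved, stated in full; the proofs are below) =====
def Claim_equal_decrypt_blocks : Prop := ∀ (input_data : String), Dom_decrypt_blocks input_data → Pre_decrypt_blocks input_data → Spec_decrypt_blocks input_data (decrypt_blocks input_data)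

-- ===== LEMMAS AND PROOFS =====

-- forward and reverse first-match lookup in a pair list, and the consistency predicate
def pvLook (l : List (Char × Char)) (a : Char) : Option Char :=
  (l.find? (fun p => p.1 == a)).map Prod.snd
def pvRLook (l : List (Char × Char)) (b : Char) : Option Char :=
  (l.find? (fun p => p.2 == b)).map Prod.fst
def pvCons (l : List (Char × Char)) : Prop :=
  ∀ p ∈ l, ∀ q ∈ l, (p.1 = q.1 ↔ p.2 = q.2)

-- `''.join` with empty separator is flatten
lemma join_nil_eq_flatten (l : List (List Char)) : PySem.Chars.join [] l = l.flatten := by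
  induction l with
  | nil => rfl
  | cons x xs ih =>
    cases xs with
    | nil => simp [PySem.Chars.join, List.intercalate]
    | cons y ys =>
      simp only [PySem.Chars.join, List.intercalate, List.intersperse] at *
      simp_all

-- zip of two flattens = flatten of pairwise zips (pointwise equal lengths)
lemma zip_flatten (l : List (List Char × List Char))
    (h : ∀ p ∈ l, p.1.length = p.2.length) :
    (l.map Prod.fst).flatten.zip (l.map Prod.snd).flatten
      = l.flatMap (fun p => p.1.zip p.2) := by
  induction l with
  | nil => rfl
  | cons p ps ih =>
    simp only [List.map_cons, List.flatten_cons, List.flatMap_cons]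
    rw [List.zip_append (h p (by simp)), ih (fun q hq => h q (by simp [hq]))]

-- A's word loop dies whenever some word pair has mismatched lengths
lemma wordLoopA_none (ws : List (List Char × List Char)) (st)
    (h : ∃ p ∈ ws, p.1.length ≠ p.2.length) : pvWordLoopA ws st = none := by
  induction ws generalizing st with
  | nil => simp at h
  | cons p ps ih =>
    obtain ⟨q, hq, hne⟩ := h
    obtain ⟨ew, kw⟩ := p
    simp only [pvWordLoopA]
    rcases List.mem_cons.mp hq with h1 | h1
    · rw [if_pos (by rw [h1] at hne; exact hne)]
    · split
      · rfl
      · rcases hc : pvChLoopA (ew.zip kw) st with _ | st'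
        · simp
        · exact ih st' ⟨q, h1, hne⟩

lemma chLoopA_append (xs ys : List (Char × Char)) (st) :
    pvChLoopA (xs ++ ys) st = (pvChLoopA xs st).bind (pvChLoopA ys) := by
  induction xs generalizing st with
  | nil => simp [pvChLoopA]
  | cons p ps ih =>
    obtain ⟨e, k⟩ := p
    obtain ⟨m, r⟩ := st
    simp only [List.cons_append, pvChLoopA]
    rcases hm : m.get? e with _ | k' <;> rcases hr : r.get? k with _ | e' <;>
      dsimp only <;> (repeat' split) <;> simp [ih]

-- with all word lengths matching, A's nested loops are the flat char loop
lemma wordLoopA_flat (ws : List (List Char × List Char)) (st)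
    (h : ∀ p ∈ ws, p.1.length = p.2.length) :
    pvWordLoopA ws st = (pvChLoopA (ws.flatMap (fun p => p.1.zip p.2)) st).map Prod.fst := by
  induction ws generalizing st with
  | nil => simp [pvWordLoopA, pvChLoopA]
  | cons p ps ih =>
    obtain ⟨ew, kw⟩ := p
    simp only [pvWordLoopA, List.flatMap_cons, chLoopA_append]
    rw [if_neg (by simp [h ⟨ew, kw⟩ (by simp)])]
    rcases hc : pvChLoopA (ew.zip kw) st with _ | st'
    · simp
    · simp [ih st' (fun q hq => h q (by simp [hq]))]

lemma ptwise {l₁ l₂ : List (List Char)} (h : l₁.map List.length = l₂.map List.length) :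
    ∀ p ∈ l₁.zip l₂, p.1.length = p.2.length := by
  induction l₁ generalizing l₂ with
  | nil => simp
  | cons x xs ih =>
    cases l₂ with
    | nil => simp at h
    | cons y ys =>
      simp only [List.map_cons, List.cons.injEq] at h
      intro p hp
      rcases List.mem_cons.mp hp with rfl | hp
      · exact h.1
      · exact ih h.2 p hp

lemma map_len_eq {l₁ l₂ : List (List Char)} (hlen : l₁.length = l₂.length)
    (h : ∀ p ∈ l₁.zip l₂, p.1.length = p.2.length) :
    l₁.map List.length = l₂.map List.length := by
  induction l₁ generalizing l₂ with
  | nil => cases l₂ with | nil => rfl | cons y ys => simp at hlen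
  | cons x xs ih =>
    cases l₂ with
    | nil => simp at hlen
    | cons y ys =>
      simp only [List.map_cons, List.cons.injEq]
      exact ⟨h (x, y) (by simp), ih (by simpa using hlen) (fun p hp => h p (by simp [hp]))⟩

-- lookup helpers: what a some / none result says about the list
lemma look_some_mem {l : List (Char × Char)} {x y : Char} (h : pvLook l x = some y) :
    (x, y) ∈ l := by
  unfold pvLook at h
  rcases hf : l.find? (fun p => p.1 == x) with _ | q
  · rw [hf] at h; simp at h
  · rw [hf] at h
    have hq1 : q.1 = x := by simpa using List.find?_some hf
    have hq2 : q.2 = y := by simpa using h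
    have := List.mem_of_find?_eq_some hf
    rwa [show q = (x, y) from Prod.ext hq1 hq2] at this

lemma rlook_some_mem {l : List (Char × Char)} {x y : Char} (h : pvRLook l y = some x) :
    (x, y) ∈ l := by
  unfold pvRLook at h
  rcases hf : l.find? (fun p => p.2 == y) with _ | q
  · rw [hf] at h; simp at h
  · rw [hf] at h
    have hq2 : q.2 = y := by simpa using List.find?_some hf
    have hq1 : q.1 = x := by simpa using h
    have := List.mem_of_find?_eq_some hf
    rwa [show q = (x, y) from Prod.ext hq1 hq2] at this

lemma look_none_forall {l : List (Char × Char)} {x : Char} (h : pvLook l x = none) :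
    ∀ q ∈ l, q.1 ≠ x := by
  intro q hq
  unfold pvLook at h
  rcases hf : l.find? (fun p => p.1 == x) with _ | p
  · simpa using List.find?_eq_none.mp hf q hq
  · rw [hf] at h; simp at h

lemma rlook_none_forall {l : List (Char × Char)} {y : Char} (h : pvRLook l y = none) :
    ∀ q ∈ l, q.2 ≠ y := by
  intro q hq
  unfold pvRLook at h
  rcases hf : l.find? (fun p => p.2 == y) with _ | p
  · simpa using List.find?_eq_none.mp hf q hq
  · rw [hf] at h; simp at h

lemma look_isSome_of_mem {l : List (Char × Char)} {x y : Char} (h : (x, y) ∈ l) :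
    pvLook l x ≠ none := fun hn => look_none_forall hn (x, y) h rfl

lemma rlook_of_mem_cons {l : List (Char × Char)} {x y : Char} (hc : pvCons l)
    (h : (x, y) ∈ l) : pvRLook l y = some x := by
  unfold pvRLook
  rcases hf : l.find? (fun p => p.2 == y) with _ | q
  · exact absurd (by simp : ((x, y).2 == y) = true) (List.find?_eq_none.mp hf (x, y) h)
  · have hq2 : q.2 = y := by simpa using List.find?_some hf
    have hq1 : q.1 = x := (hc q (List.mem_of_find?_eq_some hf) (x, y) h).mpr hq2
    rw [hf]
    simp [hq1]

-- pvLook over an appended fresh pair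
lemma look_append_single (l : List (Char × Char)) (x y a : Char) :
    pvLook (l ++ [(x, y)]) a = (pvLook l a).or (if x = a then some y else none) := by
  unfold pvLook
  rcases hf : l.find? (fun p => p.1 == a) with _ | q <;> rw [List.find?_append, hf]
  · by_cases hx : x = a
    · simp [List.find?, hx]
    · have hb : (x == a) = false := beq_eq_false_iff_ne.mpr hx
      simp [List.find?, hb, hx]
  · simp

lemma rlook_append_single (l : List (Char × Char)) (x y b : Char) :
    pvRLook (l ++ [(x, y)]) b = (pvRLook l b).or (if y = b then some x else none) := by
  unfold pvRLook
  rcases hf : l.find? (fun p => p.2 == b) with _ | q <;> rw [List.find?_append, hf]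
  · by_cases hy : y = b
    · simp [List.find?, hy]
    · have hb : (y == b) = false := beq_eq_false_iff_ne.mpr hy
      simp [List.find?, hb, hy]
  · simp

-- CORE: A's two-dict verify-while-building char loop succeeds exactly on consistent pair lists,
-- and its forward dict then answers first-match lookup
lemma chLoopA_main (ps : List (Char × Char)) : ∀ (l : List (Char × Char))
    (m r : PySem.Dict Char Char),
    (∀ a, m.get? a = pvLook l a) → (∀ b, r.get? b = pvRLook l b) → pvCons l →
    (¬ pvCons (l ++ ps) → pvChLoopA ps (m, r) = none) ∧
    (pvCons (l ++ ps) → ∃ M R, pvChLoopA ps (m, r) = some (M, R) ∧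
      ∀ a, M.get? a = pvLook (l ++ ps) a) := by
  induction ps with
  | nil =>
    intro l m r hm hr hc
    refine ⟨fun h => absurd hc (by simpa using h), fun _ => ⟨m, r, rfl, by simpa using hm⟩⟩
  | cons p ps ih =>
    obtain ⟨x, y⟩ := p
    intro l m r hm hr hc
    have hcons_mem : pvCons (l ++ (x, y) :: ps) → ∀ q ∈ l, (q.1 = x ↔ q.2 = y) := by
      intro hcons q hq
      exact hcons q (List.mem_append_left _ hq) (x, y) (List.mem_append_right _ (by simp))
    rcases hxl : pvLook l x with _ | y'
    · -- x unseen so far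
      have hx1 : ∀ q ∈ l, q.1 ≠ x := look_none_forall hxl
      rcases hry : pvRLook l y with _ | x'
      · -- y unseen too: insert into both dicts and recurse
        simp only [pvChLoopA, hm x, hxl, hr y, hry]
        have hy2 : ∀ q ∈ l, q.2 ≠ y := rlook_none_forall hry
        have hm' : ∀ a, (m.insert x y).get? a = pvLook (l ++ [(x, y)]) a := by
          intro a
          rw [look_append_single]
          by_cases hax : a = x
          · subst hax
            rw [PySem.Dict.get?_insert_self, hxl]
            simp
          · rw [PySem.Dict.get?_insert_of_ne _ _ hax, hm a,
              if_neg (fun h => hax h.symm)]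
            simp
        have hr' : ∀ b, (r.insert y x).get? b = pvRLook (l ++ [(x, y)]) b := by
          intro b
          rw [rlook_append_single]
          by_cases hby : b = y
          · subst hby
            rw [PySem.Dict.get?_insert_self, hry]
            simp
          · rw [PySem.Dict.get?_insert_of_ne _ _ hby, hr b,
              if_neg (fun h => hby h.symm)]
            simp
        have hc' : pvCons (l ++ [(x, y)]) := by
          intro p hp q hq
          rcases List.mem_append.mp hp with hp | hp <;>
            rcases List.mem_append.mp hq with hq | hq
          · exact hc p hp q hq
          · rw [List.mem_singleton.mp hq]
            exact ⟨fun h => absurd h (hx1 p hp), fun h => absurd h (hy2 p hp)⟩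
          · rw [List.mem_singleton.mp hp]
            exact ⟨fun h => absurd h.symm (hx1 q hq), fun h => absurd h.symm (hy2 q hq)⟩
          · rw [List.mem_singleton.mp hp, List.mem_singleton.mp hq]
            simp
        have := ih (l ++ [(x, y)]) (m.insert x y) (r.insert y x) hm' hr' hc'
        rw [List.append_cons l (x, y) ps]
        exact this
      · -- y already maps back to some x' ≠ x: A returns None; the list is inconsistent
        simp only [pvChLoopA, hm x, hxl, hr y, hry]
        have hmem : (x', y) ∈ l := rlook_some_mem hry
        have hne : x' ≠ x := hx1 (x', y) hmem
        rw [if_pos hne]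
        refine ⟨fun _ => rfl, fun hcons => absurd ((hcons_mem hcons (x', y) hmem).mpr rfl) hne⟩
    · -- x maps to y'
      have hmem : (x, y') ∈ l := look_some_mem hxl
      by_cases hy : y' = y
      · -- consistent entry: both dicts unchanged, recurse
        subst hy
        simp only [pvChLoopA, hm x, hxl, hr y', rlook_of_mem_cons hc hmem]
        rw [if_neg (by simp), if_neg (by simp)]
        have hm' : ∀ a, m.get? a = pvLook (l ++ [(x, y')]) a := by
          intro a
          rw [look_append_single, hm a]
          rcases hla : pvLook l a with _ | v
          · have hax : ¬ x = a := fun h => look_isSome_of_mem (h ▸ hmem) hla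
            simp [hax]
          · simp
        have hr' : ∀ b, r.get? b = pvRLook (l ++ [(x, y')]) b := by
          intro b
          rw [rlook_append_single, hr b]
          rcases hlb : pvRLook l b with _ | v
          · have hby : ¬ y' = b := fun h => by
              have := rlook_none_forall hlb (x, y') hmem
              exact this (by simpa using h)
            simp [hby]
          · simp
        have hc' : pvCons (l ++ [(x, y')]) := by
          intro p hp q hq
          rcases List.mem_append.mp hp with hp | hp <;>
            rcases List.mem_append.mp hq with hq | hq
          · exact hc p hp q hq
          · rw [List.mem_singleton.mp hq]; exact hc p hp (x, y') hmem
          · rw [List.mem_singleton.mp hp]; exact hc (x, y') hmem q hq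
          · rw [List.mem_singleton.mp hp, List.mem_singleton.mp hq]; simp
        have := ih (l ++ [(x, y')]) m r hm' hr' hc'
        rw [List.append_cons l (x, y') ps]
        exact this
      · -- forward conflict: A returns None; the list is inconsistent
        simp only [pvChLoopA, hm x, hxl]
        rw [if_pos hy]
        refine ⟨fun _ => rfl, fun hcons => absurd ((hcons_mem hcons (x, y') hmem).mp rfl) hy⟩

-- find_mapping: word-length-profile mismatch means None
lemma findA_profile_ne (line : List Char)
    (h : (PySem.Chars.split₀ line).map List.length
        ≠ (PySem.Chars.split₀ pvKnownPlain).map List.length) :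
    pvFindMappingA line = none := by
  simp only [pvFindMappingA]
  by_cases hlen : (PySem.Chars.split₀ line).length = (PySem.Chars.split₀ pvKnownPlain).length
  · rw [if_neg (by simpa using hlen)]
    refine wordLoopA_none _ _ ?_
    have hall : ¬ ∀ p ∈ (PySem.Chars.split₀ line).zip (PySem.Chars.split₀ pvKnownPlain),
        p.1.length = p.2.length := fun hall => h (map_len_eq hlen hall)
    simpa [not_forall] using hall
  · rw [if_pos hlen]

-- find_mapping with matching profiles: the flat char loop over the joined words
lemma findA_flat (line : List Char)
    (h : (PySem.Chars.split₀ line).map List.length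
        = (PySem.Chars.split₀ pvKnownPlain).map List.length) :
    pvFindMappingA line
      = (pvChLoopA ((PySem.Chars.join [] (PySem.Chars.split₀ line)).zip
          (PySem.Chars.join [] (PySem.Chars.split₀ pvKnownPlain)))
          (PySem.Dict.empty, PySem.Dict.empty)).map Prod.fst := by
  have hlen : (PySem.Chars.split₀ line).length = (PySem.Chars.split₀ pvKnownPlain).length := by
    simpa using congrArg List.length h
  simp only [pvFindMappingA]
  rw [if_neg (by simpa using hlen)]
  have hpt := ptwise h
  rw [wordLoopA_flat _ _ hpt]
  have hflat0 := zip_flatten _ hpt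
  rw [List.map_fst_zip (le_of_eq hlen), List.map_snd_zip (le_of_eq hlen.symm)] at hflat0
  rw [join_nil_eq_flatten, join_nil_eq_flatten, hflat0]

-- index? from an explicit first-occurrence description
lemma index?_of_spec {xs : List Char} {v : Char} {k : Nat} (hk : k < xs.length)
    (h1 : xs[k] = v) (h2 : ∀ j (hj : j < k), xs[j] ≠ v) :
    PySem.List.index? xs v = some k := by
  rw [PySem.List.index?_eq_some_iff]
  refine ⟨xs.take k, xs.drop (k + 1), ?_, by simp [hk.le], ?_⟩
  · conv_lhs => rw [← List.take_append_drop k xs]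
    rw [List.drop_eq_getElem_cons hk, h1]
  · intro hv
    obtain ⟨j, hj, hje⟩ := List.mem_iff_getElem.mp hv
    have hjl : j < k := by
      have hj' := hj
      simp only [List.length_take, lt_min_iff] at hj'
      exact hj'.1
    exact h2 j hjl (by simpa [List.getElem_take] using hje)

lemma mem_zip_of_lt {e k : List Char} (hlen : e.length = k.length) {i : Nat}
    (hi : i < e.length) :
    (e[i], k[i]'(by omega)) ∈ e.zip k := by
  exact List.mem_iff_getElem.mpr ⟨i, by simp [List.length_zip]; omega, by simp⟩

-- one direction of 'equal patterns ⇒ equal equalities'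
lemma pat_dir {e k : List Char} (hlen : e.length = k.length)
    (hp : ∀ i (hi : i < e.length),
      PySem.List.index? e e[i] = PySem.List.index? k (k[i]'(by omega)))
    {i j : Nat} (hi : i < e.length) (hj : j < e.length) (hij : e[i] = e[j]) :
    k[i]'(by omega) = k[j]'(by omega) := by
  have h1 := hp i hi
  have h2 := hp j hj
  rw [hij] at h1
  obtain ⟨t, ht⟩ := Option.isSome_iff_exists.mp
    ((PySem.List.index?_isSome_iff e e[j]).mpr (List.getElem_mem hj))
  rw [ht] at h1 h2
  obtain ⟨hk1, he1, -⟩ := PySem.List.getElem_of_index?_eq_some h1.symm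
  obtain ⟨hk2, he2, -⟩ := PySem.List.getElem_of_index?_eq_some h2.symm
  rw [← he1, he2]

lemma pat_pointwise {e k : List Char}
    (hp : e.map (fun c => PySem.List.index? e c) = k.map (fun c => PySem.List.index? k c)) :
    ∀ i (hi : i < e.length),
      PySem.List.index? e e[i] = PySem.List.index? k (k[i]'(by
        have := congrArg List.length hp; simp at this; omega)) := by
  intro i hi
  have hlen : e.length = k.length := by
    have := congrArg List.length hp; simpa using this
  have := congrArg (fun l => l[i]?) hp
  simp only [List.getElem?_map] at this
  rw [List.getElem?_eq_getElem hi, List.getElem?_eq_getElem (by omega : i < k.length)] at this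
  simpa using this

-- equal first-occurrence patterns give a consistent zip
lemma cons_of_pat {e k : List Char} (hlen : e.length = k.length)
    (hp : e.map (fun c => PySem.List.index? e c) = k.map (fun c => PySem.List.index? k c)) :
    pvCons (e.zip k) := by
  intro p hp1 q hq1
  obtain ⟨i, hi, hpe⟩ := List.mem_iff_getElem.mp hp1
  obtain ⟨j, hj, hqe⟩ := List.mem_iff_getElem.mp hq1
  have hi' : i < e.length := by simp [List.length_zip] at hi; omega
  have hj' : j < e.length := by simp [List.length_zip] at hj; omega
  rw [← hpe, ← hqe, List.getElem_zip, List.getElem_zip]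
  constructor
  · exact fun h => pat_dir hlen (pat_pointwise hp) hi' hj' h
  · exact fun h => pat_dir hlen.symm (pat_pointwise hp.symm) (by omega) (by omega) h

-- a consistent zip gives equal first-occurrence patterns
lemma pat_of_cons {e k : List Char} (hlen : e.length = k.length)
    (hc : pvCons (e.zip k)) :
    e.map (fun c => PySem.List.index? e c) = k.map (fun c => PySem.List.index? k c) := by
  have hcc : ∀ i j (hi : i < e.length) (hj : j < e.length),
      (e[i] = e[j] ↔ k[i]'(by omega) = k[j]'(by omega)) := fun i j hi hj =>
    hc _ (mem_zip_of_lt hlen hi) _ (mem_zip_of_lt hlen hj)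
  apply List.ext_getElem (by simp [hlen])
  intro i hi1 hi2
  have hi : i < e.length := by simpa using hi1
  simp only [List.getElem_map]
  obtain ⟨t, ht⟩ := Option.isSome_iff_exists.mp
    ((PySem.List.index?_isSome_iff e e[i]).mpr (List.getElem_mem hi))
  obtain ⟨hkt, het, hmin⟩ := PySem.List.getElem_of_index?_eq_some ht
  rw [ht]
  refine (index?_of_spec (xs := k) (v := k[i]'(by omega)) (k := t) (by omega) ?_ ?_).symm
  · exact (hcc t i hkt hi).mp het
  · intro j hj hje
    exact hmin j hj ((hcc j i (by omega) hi).mpr hje)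

-- first-match lookup in the zip = positional lookup through e.index(c)
lemma look_zip_getD (e : List Char) : ∀ (k : List Char) (c : Char),
    e.length = k.length → (pvLook (e.zip k) c).getD c = pvDecCharB e k c := by
  induction e with
  | nil => intro k c _; simp [pvLook, pvDecCharB]
  | cons x e' ih =>
    intro k c hlen
    cases k with
    | nil => simp at hlen
    | cons y k' =>
      have hlen' : e'.length = k'.length := by simpa using hlen
      by_cases hxc : x = c
      · subst hxc
        simp only [pvLook, pvDecCharB, List.zip_cons_cons, List.find?]
        rw [PySem.List.index?_cons_self]
        simp
      · have hb : (x == c) = false := beq_eq_false_iff_ne.mpr hxc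
        have hfind : pvLook ((x, y) :: e'.zip k') c = pvLook (e'.zip k') c := by
          simp [pvLook, List.find?, hb]
        rw [List.zip_cons_cons, hfind, ih k' c hlen']
        simp only [pvDecCharB]
        rw [PySem.List.index?_cons_of_ne _ hxc]
        rcases hidx : PySem.List.index? e' c with _ | i
        · have : c ∉ e' := (PySem.List.index?_eq_none_iff _ _).mp hidx
          simp [this]
        · have hmem : c ∈ e' := (PySem.List.index?_isSome_iff e' c).mp (by rw [hidx]; rfl)
          have hi : i < e'.length := (PySem.List.getElem_of_index?_eq_some hidx).fst
          rw [if_pos (by simp [hmem]), if_pos (by simp [hmem])]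
          simp only [Option.map_some]
          rw [PySem.List.pyGetD_natCast, PySem.List.pyGetD_natCast]
          simp

-- A's validation bool = B's validation bool (any distributes over ||)
lemma guard_eq (el : List (List Char)) :
    (decide (el.length > 100) || el.any (fun line => decide (line.length > 80))
      || el.any (fun line => line.any (fun c => !(pvAlphabet.contains c))))
    = (decide (el.length > 100) || el.any (fun line => decide (line.length > 80)
        || line.any (fun c => !(pvAlphabet.contains c)))) := by
  rw [Bool.or_assoc]
  congr 1
  rw [Bool.eq_iff_iff]
  simp only [Bool.or_eq_true, List.any_eq_true]
  constructor
  · rintro (⟨l, hl, h⟩ | ⟨l, hl, h⟩)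
    · exact ⟨l, hl, Or.inl h⟩
    · exact ⟨l, hl, Or.inr h⟩
  · rintro ⟨l, hl, h | h⟩
    · exact Or.inl ⟨l, hl, h⟩
    · exact Or.inr ⟨l, hl, h⟩

-- the per-block bodies agree
set_option maxHeartbeats 1600000 in
lemma block_eq (b : List Char) : pvBlockA b = pvSolveBlockB b := by
  simp only [pvBlockA, pvSolveBlockB, pvDecryptLineA, pvKB]
  rw [guard_eq]
  cases hok : (decide ((PySem.List.slice (PySem.Chars.splitOn (PySem.Chars.strip b) ['\n'])
        (some 1) none).length > 100)
      || (PySem.List.slice (PySem.Chars.splitOn (PySem.Chars.strip b) ['\n']) (some 1) none).any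
        (fun line => decide (line.length > 80) || line.any (fun c => !(pvAlphabet.contains c))))
  case true => simp
  case false =>
    simp only [Bool.false_eq_true, if_false]
    set body := PySem.List.slice (PySem.Chars.splitOn (PySem.Chars.strip b) ['\n']) (some 1) none
    set ew := PySem.Chars.split₀ (PySem.List.pyGetD body 0 []) with hew
    set kw := PySem.Chars.split₀ pvKnownPlain with hkw
    by_cases hmap : ew.map List.length = kw.map List.length
    · rw [findA_flat _ hmap, if_neg (by simpa using hmap)]
      set e := PySem.Chars.join [] ew with he
      set kk := PySem.Chars.join [] kw with hkk
      have hlen : e.length = kk.length := by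
        rw [he, hkk, join_nil_eq_flatten, join_nil_eq_flatten,
          List.length_flatten, List.length_flatten, hmap]
      by_cases hpat : e.map (fun c => PySem.List.index? e c)
          = kk.map (fun c => PySem.List.index? kk c)
      · rw [if_neg (by simpa using hpat)]
        have hcons : pvCons (e.zip kk) := cons_of_pat hlen hpat
        obtain ⟨M, R, hsome, hM⟩ :=
          (chLoopA_main (e.zip kk) [] PySem.Dict.empty PySem.Dict.empty
            (by intro a; simp [pvLook, PySem.Dict.get?_empty])
            (by intro b; simp [pvRLook, PySem.Dict.get?_empty])
            (by intro p hp; simp at hp)).2 (by simpa using hcons)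
        rw [hsome]
        have hM' : ∀ a, M.get? a = pvLook (e.zip kk) a := by
          intro a; rw [hM a]; simp
        -- the mapping is never empty: kk has 35 characters
        have hkk35 : kk.length = 35 := by rw [hkk, hkw]; decide
        have hne : M.items.isEmpty = false := by
          rcases hE : e with _ | ⟨c0, e0⟩
          · rw [hE] at hlen; rw [hkk35] at hlen; simp at hlen
          · rcases hK : kk with _ | ⟨d0, k0⟩
            · rw [hK] at hkk35; simp at hkk35
            · have : M.get? c0 = some d0 := by
                rw [hM' c0, hE, hK]
                simp [pvLook]
              have hmem := PySem.Dict.mem_items_of_get?_eq_some _ this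
              simp
              exact List.ne_nil_of_mem hmem
        simp only [Option.map_some, hne, Bool.false_eq_true, if_false]
        congr 2
        refine congrArg (PySem.Chars.join ['\n']) ?_
        refine List.map_congr_left (fun line _ => ?_)
        refine congrArg (PySem.Chars.join []) ?_
        refine List.map_congr_left (fun c _ => ?_)
        rw [PySem.Dict.getD_eq_get?_getD, hM' c, look_zip_getD e kk c hlen]
      · rw [if_pos (by simpa using hpat)]
        have hnone := (chLoopA_main (e.zip kk) [] PySem.Dict.empty PySem.Dict.empty
            (by intro a; simp [pvLook, PySem.Dict.get?_empty])
            (by intro b; simp [pvRLook, PySem.Dict.get?_empty])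
            (by intro p hp; simp at hp)).1
          (by intro hcons; exact hpat (pat_of_cons hlen (by simpa using hcons)))
        rw [hnone]
        simp
    · rw [findA_profile_ne _ (by rw [← hew, ← hkw]; exact hmap), if_pos (by simpa using hmap)]

-- ===== VERDICT (by name: the statement is the Claim_ definition above) =====
theorem decrypt_blocks_spec : Claim_equal_decrypt_blocks := by
  intro s _ _
  unfold Spec_decrypt_blocks decrypt_blocks decrypt_blocks_alt
  simp only [PySem.List.foldl_append_singleton_eq_map pvBlockA, List.nil_append]
  congr 2
  exact List.map_congr_left (fun b _ => block_eq b)
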